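-- pv_equiv track=rewrite | github.com/mandalbiswadip/ContextualGeneration | scripts/util.py | span_range_token_indices
-- ===== SOURCE A (Python) =====
-- def span_range_token_indices(span_labels, citation_labels):
--     prev_label = "O"
--     span_ranges = []
--     span_types = []
--     for i, label in enumerate(span_labels):
--         if prev_label == "I_span" and label != "I_span":
--             end = i
--             span_ranges.append((start, end))
--             citation_types = set(citation_labels[start: end])
--             if "B_Dominant" in citation_types or "I_Dominant" in citation_types:
--                 span_types.append("Dominant")
--             else:
--                 span_types.append("Reference")
--         if label == "B_span":
--             start = i
--         prev_label = label
--     return span_ranges, span_types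
-- ===== SOURCE B (Python) =====
-- def span_range_token_indices(span_labels, citation_labels):
--     n = len(span_labels)
--     ends = [i for i in range(1, n)
--             if span_labels[i - 1] == "I_span" and span_labels[i] != "I_span"]
--     span_ranges = [(max(j for j in range(e) if span_labels[j] == "B_span"), e)
--                    for e in ends]
--     span_types = ["Dominant"
--                   if any(l in ("B_Dominant", "I_Dominant") for l in citation_labels[s:e])
--                   else "Reference"
--                   for (s, e) in span_ranges]
--     return span_ranges, span_types
-- ===== Notes on version B (the rewrite author's own statement) =====
-- stated objective: alternative
-- what changed: A's single-pass state machine (prev-label tracking, mutable start, classify inline at each span close) is replaced by an index-based decomposition: span ends are found by filtering positions on the I_span->non-I_span transition, each start is recovered as the max B_span position before its end, and classification is a separate any-scan over the citation slice.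
import Mathlib
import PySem

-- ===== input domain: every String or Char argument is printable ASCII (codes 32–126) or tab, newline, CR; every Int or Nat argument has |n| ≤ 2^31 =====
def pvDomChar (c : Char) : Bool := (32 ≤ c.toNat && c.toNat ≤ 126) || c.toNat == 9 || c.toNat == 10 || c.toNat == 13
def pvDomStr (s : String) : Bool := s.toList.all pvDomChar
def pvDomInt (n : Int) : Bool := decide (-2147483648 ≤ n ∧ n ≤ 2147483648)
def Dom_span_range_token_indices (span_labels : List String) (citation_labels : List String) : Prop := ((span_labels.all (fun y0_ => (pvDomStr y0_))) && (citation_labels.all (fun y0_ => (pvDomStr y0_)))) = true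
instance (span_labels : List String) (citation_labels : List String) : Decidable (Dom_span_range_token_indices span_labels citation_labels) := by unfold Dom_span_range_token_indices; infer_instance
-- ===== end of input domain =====

-- B replaces A's one-pass state machine by an index-based decomposition: span ends found by a
-- filter over positions, each start recovered as the max "B_span" position before its end,
-- classification by a scan of the slice; objective: alternative (similar cost).

-- ===== PORT A =====
-- loop body of A's for-loop; state = (prev_label, span_ranges, span_types, start).
-- start : Option Int — Python's `start` is unbound (none) until the first "B_span"; Python
-- raises NameError where this port reads `.getD 0`; those inputs are excluded by Pre_.
def pvStepA (cl : List String) (acc : String × List (Int × Int) × List String × Option Int)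
    (p : Int × String) : String × List (Int × Int) × List String × Option Int :=
  let prev := acc.1
  let ranges := acc.2.1
  let types := acc.2.2.1
  let start := acc.2.2.2
  let rt :=
    if prev = "I_span" ∧ p.2 ≠ "I_span" then
      let s0 := start.getD 0
      let cts := PySem.Set.ofList (PySem.List.slice cl (some s0) (some p.1))
      (ranges ++ [(s0, p.1)],
       types ++ [if cts.contains "B_Dominant" || cts.contains "I_Dominant" then "Dominant" else "Reference"])
    else (ranges, types)
  (p.2, rt.1, rt.2, if p.2 = "B_span" then some p.1 else start)

def span_range_token_indices (span_labels : List String) (citation_labels : List String) : (List (Int × Int)) × List String :=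
  let st := (PySem.List.enumerate span_labels).foldl (pvStepA citation_labels) ("O", [], [], none)
  (st.2.1, st.2.2.1)

-- ===== PORT B =====
-- [i for i in range(1, n) if span_labels[i-1] == "I_span" and span_labels[i] != "I_span"]
def pvEnds (sl : List String) : List Int :=
  (PySem.List.pyRange 1 sl.length 1).filter
    (fun i => PySem.List.pyGetD sl (i - 1) "" == "I_span" && PySem.List.pyGetD sl i "" != "I_span")

-- max(j for j in range(e) if span_labels[j] == "B_span"); none exactly where Python's max
-- raises ValueError (outside Pre_); read with `.getD 0` at the use site
def pvLastB (sl : List String) (e : Int) : Option Int :=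
  PySem.List.max? ((PySem.List.pyRange 0 e 1).filter (fun j => PySem.List.pyGetD sl j "" == "B_span")) (fun x => x)

-- "Dominant" if any(l in ("B_Dominant", "I_Dominant") for l in citation_labels[s:e]) else "Reference"
def pvClassify (cl : List String) (r : Int × Int) : String :=
  if (PySem.List.slice cl (some r.1) (some r.2)).any (fun l => l == "B_Dominant" || l == "I_Dominant")
  then "Dominant" else "Reference"

def span_range_token_indices_alt (span_labels : List String) (citation_labels : List String) : (List (Int × Int)) × List String :=
  let span_ranges := (pvEnds span_labels).map (fun e => ((pvLastB span_labels e).getD 0, e))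
  let span_types := span_ranges.map (pvClassify citation_labels)
  (span_ranges, span_types)

-- ===== PRECONDITION & SPEC =====
-- Pre_ excludes exactly the inputs on which Python A raises NameError (a span run closes before
-- any "B_span" has bound `start`); B's Python raises ValueError there too (max of an empty sequence).
def Pre_span_range_token_indices (span_labels : List String) (citation_labels : List String) : Prop :=
  ∀ k ∈ List.range span_labels.length,
    (0 < k ∧ span_labels.getD (k - 1) "" = "I_span" ∧ span_labels.getD k "" ≠ "I_span") →
    ∃ j ∈ List.range k, span_labels.getD j "" = "B_span"
instance (span_labels : List String) (citation_labels : List String) : Decidable (Pre_span_range_token_indices span_labels citation_labels) := by unfold Pre_span_range_token_indices; infer_instance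

def pvWitness_span_range_token_indices : List String × List String :=
  (["B_span", "I_span", "O"], ["B_Dominant", "O", "O"])

def Spec_span_range_token_indices (span_labels : List String) (citation_labels : List String) (out : (List (Int × Int)) × List String) : Prop := out = span_range_token_indices_alt span_labels citation_labels
instance (span_labels : List String) (citation_labels : List String) (out : (List (Int × Int)) × List String) : Decidable (Spec_span_range_token_indices span_labels citation_labels out) := by unfold Spec_span_range_token_indices; infer_instance

-- ===== CLAIM (what is proved, stated in full; the proofs are below) =====
def Claim_equal_span_range_token_indices : Prop := ∀ (span_labels : List String) (citation_labels : List String), Dom_span_range_token_indices span_labels citation_labels → Pre_span_range_token_indices span_labels citation_labels → Spec_span_range_token_indices span_labels citation_labels (span_range_token_indices span_labels citation_labels)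

-- ===== LEMMAS AND PROOFS =====

-- A's fold state, named for the induction
def pvState (sl cl : List String) : String × List (Int × Int) × List String × Option Int :=
  (PySem.List.enumerate sl).foldl (pvStepA cl) ("O", [], [], none)

theorem pvGetDAppend_lt (sl : List String) (x : String) (j : Int) (h0 : 0 ≤ j) (h : j < sl.length) :
    PySem.List.pyGetD (sl ++ [x]) j "" = PySem.List.pyGetD sl j "" := by
  rw [PySem.List.pyGetD_eq_getElem _ _ h0 (by simp; omega), PySem.List.pyGetD_eq_getElem _ _ h0 (by exact_mod_cast h)]
  exact List.getElem_append_left (by omega)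

theorem pvGetDAppend_last (sl : List String) (x : String) :
    PySem.List.pyGetD (sl ++ [x]) (sl.length : Int) "" = x := by
  rw [PySem.List.pyGetD_eq_getElem _ _ (by positivity) (by simp)]
  simp

theorem pvGetLastD (sl : List String) (h : sl ≠ []) :
    PySem.List.pyGetD sl ((sl.length : Int) - 1) "" = sl.getLastD "O" := by
  have hlen : 0 < sl.length := List.length_pos_iff.mpr h
  rw [PySem.List.pyGetD_eq_getElem _ _ (by omega) (by omega)]
  have hgl : sl.getLastD "O" = sl.getLast h := by
    cases sl with
    | nil => exact absurd rfl h
    | cons a t => simp [List.getLastD_eq_getLast?, List.getLast?_eq_some_getLast]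
  rw [hgl, List.getLast_eq_getElem h]
  congr 1
  omega

theorem pvFoldlMaxLe (t : List Int) (a m : Int) (ha : a ≤ m) (ht : ∀ y ∈ t, y ≤ m) :
    t.foldl max a ≤ m := by
  induction t generalizing a with
  | nil => exact ha
  | cons x xs ih =>
      exact ih (max a x) (max_le ha (ht x (List.mem_cons_self))) (fun y hy => ht y (List.mem_cons_of_mem _ hy))

-- the running max of a list bounded by m, capped by appending m
theorem pvMaxAppend (l : List Int) (m : Int) (h : ∀ y ∈ l, y ≤ m) :
    PySem.List.max? (l ++ [m]) (fun y => y) = some m := by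
  cases l with
  | nil => simp [PySem.List.max?_id_cons]
  | cons x t =>
      rw [List.cons_append, PySem.List.max?_id_cons]
      have hfold : List.foldl max x (t ++ [m]) = m := by
        rw [List.foldl_append]
        simp only [List.foldl_cons, List.foldl_nil]
        exact max_eq_right (pvFoldlMaxLe t x m (h x (List.mem_cons_self))
          (fun y hy => h y (List.mem_cons_of_mem _ hy)))
      rw [hfold]

theorem pvLastBAppend (sl : List String) (x : String) (e : Int) (h : e ≤ sl.length) :
    pvLastB (sl ++ [x]) e = pvLastB sl e := by
  unfold pvLastB
  congr 1
  apply List.filter_congr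
  intro j hj
  have hj' := PySem.List.mem_pyRange_one.mp hj
  rw [pvGetDAppend_lt sl x j hj'.1 (by omega)]

theorem pvLastBSnoc (sl : List String) (x : String) :
    pvLastB (sl ++ [x]) ((sl.length : Int) + 1) =
      (if x = "B_span" then some (sl.length : Int) else pvLastB sl sl.length) := by
  unfold pvLastB
  rw [PySem.List.pyRange_one_succ_right (by positivity), List.filter_append]
  have hleft : (PySem.List.pyRange 0 (sl.length : Int)).filter
      (fun j => PySem.List.pyGetD (sl ++ [x]) j "" == "B_span") =
      (PySem.List.pyRange 0 (sl.length : Int)).filter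
      (fun j => PySem.List.pyGetD sl j "" == "B_span") := by
    apply List.filter_congr
    intro j hj
    have hj' := PySem.List.mem_pyRange_one.mp hj
    rw [pvGetDAppend_lt sl x j hj'.1 (by omega)]
  rw [hleft]
  by_cases hx : x = "B_span"
  · have hone : List.filter (fun j => PySem.List.pyGetD (sl ++ [x]) j "" == "B_span") [(sl.length : Int)] = [(sl.length : Int)] := by
      simp [hx]
    rw [hone, if_pos hx]
    apply pvMaxAppend
    intro y hy
    have := PySem.List.mem_pyRange_one.mp (List.mem_of_mem_filter hy)
    omega
  · have hone : List.filter (fun j => PySem.List.pyGetD (sl ++ [x]) j "" == "B_span") [(sl.length : Int)] = [] := by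
      simp [hx]
    rw [hone, if_neg hx, List.append_nil]

theorem pvEndsSnoc (sl : List String) (x : String) :
    pvEnds (sl ++ [x]) =
      pvEnds sl ++ (if sl.getLastD "O" = "I_span" ∧ x ≠ "I_span" then [(sl.length : Int)] else []) := by
  unfold pvEnds
  have hlen : ((sl ++ [x]).length : Int) = (sl.length : Int) + 1 := by simp
  rw [hlen]
  rcases List.eq_nil_or_concat' sl with hnil | ⟨_, _, _⟩
  · subst hnil
    simp [PySem.List.pyRange_one_eq_nil (le_refl 1)]
  · have hsl : sl ≠ [] := by simp_all
    have h1 : (1 : Int) ≤ (sl.length : Int) := by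
      have := List.length_pos_iff.mpr hsl; omega
    rw [PySem.List.pyRange_one_succ_right h1, List.filter_append]
    congr 1
    · apply List.filter_congr
      intro i hi
      have hi' := PySem.List.mem_pyRange_one.mp hi
      rw [pvGetDAppend_lt sl x (i - 1) (by omega) (by omega), pvGetDAppend_lt sl x i (by omega) (by omega)]
    · simp only [List.filter_cons, List.filter_nil]
      rw [show PySem.List.pyGetD (sl ++ [x]) ((sl.length : Int) - 1) "" = sl.getLastD "O" by
            rw [pvGetDAppend_lt sl x _ (by have := List.length_pos_iff.mpr hsl; omega) (by omega)]
            exact pvGetLastD sl hsl,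
          pvGetDAppend_last]
      by_cases hc1 : sl.getLastD "O" = "I_span" <;> by_cases hc2 : x = "I_span" <;>
        rw [List.getLastD_eq_getLast?] at hc1 <;> simp [hc1, hc2]

-- set-membership classification = linear any-scan classification
theorem pvClassifyEq (cl : List String) (s0 e : Int) :
    (if (PySem.Set.ofList (PySem.List.slice cl (some s0) (some e))).contains "B_Dominant" ||
        (PySem.Set.ofList (PySem.List.slice cl (some s0) (some e))).contains "I_Dominant"
     then "Dominant" else "Reference") = pvClassify cl (s0, e) := by
  unfold pvClassify
  have hb : ((PySem.Set.ofList (PySem.List.slice cl (some s0) (some e))).contains "B_Dominant" ||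
      (PySem.Set.ofList (PySem.List.slice cl (some s0) (some e))).contains "I_Dominant")
      = (PySem.List.slice cl (some s0) (some e)).any (fun l => l == "B_Dominant" || l == "I_Dominant") := by
    rw [Bool.eq_iff_iff]
    simp only [PySem.Set.contains, List.contains_eq_mem, PySem.Set.mem_ofList, Bool.or_eq_true,
      decide_eq_true_eq, List.any_eq_true, beq_iff_eq]
    constructor
    · rintro (h | h)
      · exact ⟨_, h, Or.inl rfl⟩
      · exact ⟨_, h, Or.inr rfl⟩
    · rintro ⟨l, hl, rfl | rfl⟩
      · exact Or.inl hl
      · exact Or.inr hl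
  rw [hb]

-- the loop invariant: A's fold state after sl = (last label, B's ranges, B's types, last B_span index)
theorem pvMain (cl sl : List String) :
    pvState sl cl =
      (sl.getLastD "O",
       (pvEnds sl).map (fun e => ((pvLastB sl e).getD 0, e)),
       ((pvEnds sl).map (fun e => ((pvLastB sl e).getD 0, e))).map (pvClassify cl),
       pvLastB sl (sl.length : Int)) := by
  induction sl using List.reverseRecOn with
  | nil => rfl
  | append_singleton sl x ih =>
      have hmem : ∀ e ∈ pvEnds sl, pvLastB (sl ++ [x]) e = pvLastB sl e := by
        intro e he
        unfold pvEnds at he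
        have he' := PySem.List.mem_pyRange_one.mp (List.mem_of_mem_filter he)
        exact pvLastBAppend sl x e (by omega)
      have hmap : (pvEnds sl).map (fun e => ((pvLastB (sl ++ [x]) e).getD 0, e)) =
                  (pvEnds sl).map (fun e => ((pvLastB sl e).getD 0, e)) :=
        List.map_congr_left (fun e he => by rw [hmem e he])
      unfold pvState
      rw [PySem.List.enumerate_append, List.foldl_append]
      rw [show PySem.List.enumerate [x] ((0 : Int) + sl.length) = [((sl.length : Int), x)] by
        simp [PySem.List.enumerate_cons, PySem.List.enumerate_nil]]
      rw [List.foldl_cons, List.foldl_nil]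
      rw [show (PySem.List.enumerate sl).foldl (pvStepA cl) ("O", [], [], none) = pvState sl cl from rfl, ih]
      rw [show ((sl ++ [x]).length : Int) = (sl.length : Int) + 1 by simp]
      rw [List.getLastD_concat, pvEndsSnoc, pvLastBSnoc]
      simp only [pvStepA]
      by_cases hc : sl.getLastD "O" = "I_span" ∧ x ≠ "I_span"
      · rw [if_pos hc, if_pos hc]
        simp only [List.map_append, hmap, List.map_cons, List.map_nil,
          pvLastBAppend sl x (sl.length : Int) le_rfl]
        rw [pvClassifyEq]
      · rw [if_neg hc, if_neg hc]
        simp [hmap]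

-- ===== VERDICT (by name: the statement is the Claim_ definition above) =====
theorem span_range_token_indices_spec : Claim_equal_span_range_token_indices := by
  intro sl cl _ _
  show _ = _
  unfold span_range_token_indices span_range_token_indices_alt
  rw [show (PySem.List.enumerate sl).foldl (pvStepA cl) ("O", [], [], none) = pvState sl cl from rfl,
      pvMain cl sl]
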